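-- pv_equiv track=rewrite | github.com/corydentonnp-dot/np-companion | app/services/api/cdc_immunizations.py | _extract_risk_flags
-- ===== SOURCE A (Python) =====
-- def _extract_risk_flags(diagnoses: list) -> set:
--     """
--     Map patient ICD-10 diagnoses to risk factor categories for vaccine eligibility.
--     """
--     flags = set()
--     for dx in diagnoses:
--         code = (dx.get("icd10_code") or "").upper()
--         if code.startswith(("J44", "J45")):  # COPD, Asthma
--             flags.add("chronic_lung")
--         if code.startswith(("I50", "I25", "I48")):  # Heart failure, CAD, AFib
--             flags.add("chronic_heart")
--         if code.startswith(("E10", "E11")):  # Diabetes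
--             flags.add("diabetes")
--         if code.startswith(("K70", "K71", "K72", "K73", "K74", "B18", "B19")):  # Liver
--             flags.add("liver_disease")
--         if code.startswith("Z87.891"):  # Tobacco use history
--             flags.add("tobacco")
--     return flags
-- ===== SOURCE B (Python) =====
-- # Divide-and-conquer re-implementation: the flag set of a list is the union of
-- # the flag sets of its two halves; a one-element list is handled by a set
-- # comprehension over a (flag, prefixes) table.
-- _RISK_PREFIXES = [
--     ("chronic_lung", ("J44", "J45")),
--     ("chronic_heart", ("I50", "I25", "I48")),
--     ("diabetes", ("E10", "E11")),
--     ("liver_disease", ("K70", "K71", "K72", "K73", "K74", "B18", "B19")),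
--     ("tobacco", ("Z87.891",)),
-- ]
--
-- def _extract_risk_flags(diagnoses: list) -> set:
--     if not diagnoses:
--         return set()
--     if len(diagnoses) == 1:
--         code = (diagnoses[0].get("icd10_code") or "").upper()
--         return {flag for flag, prefixes in _RISK_PREFIXES if code.startswith(prefixes)}
--     mid = len(diagnoses) // 2
--     return _extract_risk_flags(diagnoses[:mid]) | _extract_risk_flags(diagnoses[mid:])
-- ===== Notes on version B (the rewrite author's own statement) =====
-- stated objective: alternative
-- what changed: Replaces the single accumulator loop with five hard-coded branches by a divide-and-conquer recursion: split the diagnosis list in half, recurse, and union the two flag sets, with the one-element base case computed by a set comprehension over a (flag, prefixes) table.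
import Mathlib
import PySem

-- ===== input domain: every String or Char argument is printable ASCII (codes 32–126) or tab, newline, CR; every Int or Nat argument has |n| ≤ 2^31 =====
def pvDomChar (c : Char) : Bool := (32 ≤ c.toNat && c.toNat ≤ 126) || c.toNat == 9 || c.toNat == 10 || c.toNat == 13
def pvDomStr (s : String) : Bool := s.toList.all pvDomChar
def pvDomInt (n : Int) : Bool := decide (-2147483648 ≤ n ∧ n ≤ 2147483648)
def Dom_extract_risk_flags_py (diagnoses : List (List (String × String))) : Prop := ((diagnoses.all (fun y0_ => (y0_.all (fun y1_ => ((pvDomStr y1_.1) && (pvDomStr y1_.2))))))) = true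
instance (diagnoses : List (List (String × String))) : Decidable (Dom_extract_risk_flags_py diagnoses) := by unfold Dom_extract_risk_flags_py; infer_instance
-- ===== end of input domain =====

-- B replaces A's single accumulator loop with five hard-coded branches by a
-- divide-and-conquer recursion: split the list in half, recurse, union the two
-- flag sets; a one-element list is handled by a set comprehension over a
-- (flag, prefixes) table. Python's set iteration order is not modelled; both
-- ports return the PySem.Set of flags (first-insertion order).

-- ===== PORT A =====
-- `(dx.get("icd10_code") or "")` ≡ `dx.get("icd10_code", "")`: "" is the only falsy str and it is the default.
def extract_risk_flags_py (diagnoses : List (List (String × String))) : List String :=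
  diagnoses.foldl (fun flags dx =>
    let code := PySem.Str.upper (PySem.Dict.getD (PySem.Dict.mk dx) "icd10_code" "")
    let flags := if PySem.Str.startswith code "J44" || PySem.Str.startswith code "J45" then
        PySem.Set.add flags "chronic_lung" else flags
    let flags := if PySem.Str.startswith code "I50" || PySem.Str.startswith code "I25" ||
        PySem.Str.startswith code "I48" then PySem.Set.add flags "chronic_heart" else flags
    let flags := if PySem.Str.startswith code "E10" || PySem.Str.startswith code "E11" then
        PySem.Set.add flags "diabetes" else flags
    let flags := if PySem.Str.startswith code "K70" || PySem.Str.startswith code "K71" ||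
        PySem.Str.startswith code "K72" || PySem.Str.startswith code "K73" ||
        PySem.Str.startswith code "K74" || PySem.Str.startswith code "B18" ||
        PySem.Str.startswith code "B19" then PySem.Set.add flags "liver_disease" else flags
    let flags := if PySem.Str.startswith code "Z87.891" then PySem.Set.add flags "tobacco" else flags
    flags) PySem.Set.empty

-- ===== PORT B =====
def pvRiskPrefixes : List (String × List String) :=
  [("chronic_lung", ["J44", "J45"]),
   ("chronic_heart", ["I50", "I25", "I48"]),
   ("diabetes", ["E10", "E11"]),
   ("liver_disease", ["K70", "K71", "K72", "K73", "K74", "B18", "B19"]),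
   ("tobacco", ["Z87.891"])]

-- `diagnoses[:mid]` / `diagnoses[mid:]` are ported as take/drop, exact for the
-- non-negative in-range mid = len//2 (PySem.List.slice_to_natCast / slice_from_natCast).
def extract_risk_flags_py_alt : List (List (String × String)) → List String
  | [] => PySem.Set.empty
  | [dx] =>
      let code := PySem.Str.upper (PySem.Dict.getD (PySem.Dict.mk dx) "icd10_code" "")
      PySem.Set.ofList ((pvRiskPrefixes.filter
        (fun fp => fp.2.any (fun p => PySem.Str.startswith code p))).map Prod.fst)
  | dx1 :: dx2 :: rest =>
      PySem.Set.union
        (extract_risk_flags_py_alt ((dx1 :: dx2 :: rest).take ((dx1 :: dx2 :: rest).length / 2)))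
        (extract_risk_flags_py_alt ((dx1 :: dx2 :: rest).drop ((dx1 :: dx2 :: rest).length / 2)))
  termination_by l => l.length
  decreasing_by
    · simp [List.length_take]; omega
    · simp [List.length_drop]; omega

-- ===== PRECONDITION & SPEC =====
def Spec_extract_risk_flags_py (diagnoses : List (List (String × String))) (out : List String) : Prop := out = extract_risk_flags_py_alt diagnoses
instance (diagnoses : List (List (String × String))) (out : List String) : Decidable (Spec_extract_risk_flags_py diagnoses out) := by unfold Spec_extract_risk_flags_py; infer_instance

-- ===== CLAIM (what is proved, stated in full; the proofs are below) =====
def Claim_equal_extract_risk_flags_py : Prop := ∀ (diagnoses : List (List (String × String))), Dom_extract_risk_flags_py diagnoses → Spec_extract_risk_flags_py diagnoses (extract_risk_flags_py diagnoses)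

-- ===== LEMMAS AND PROOFS =====
-- The flags one diagnosis contributes, in table order.
def pvHitsOf (dx : List (String × String)) : List String :=
  let code := PySem.Str.upper (PySem.Dict.getD (PySem.Dict.mk dx) "icd10_code" "")
  (pvRiskPrefixes.filter (fun fp => fp.2.any (fun p => PySem.Str.startswith code p))).map Prod.fst

-- A's five conditional adds for one code are exactly one Set.update with that code's hit list.
lemma extract_step_eq (s : List String) (dx : List (String × String)) :
    (let code := PySem.Str.upper (PySem.Dict.getD (PySem.Dict.mk dx) "icd10_code" "")
     let flags := if PySem.Str.startswith code "J44" || PySem.Str.startswith code "J45" then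
        PySem.Set.add s "chronic_lung" else s
     let flags := if PySem.Str.startswith code "I50" || PySem.Str.startswith code "I25" ||
        PySem.Str.startswith code "I48" then PySem.Set.add flags "chronic_heart" else flags
     let flags := if PySem.Str.startswith code "E10" || PySem.Str.startswith code "E11" then
        PySem.Set.add flags "diabetes" else flags
     let flags := if PySem.Str.startswith code "K70" || PySem.Str.startswith code "K71" ||
        PySem.Str.startswith code "K72" || PySem.Str.startswith code "K73" ||
        PySem.Str.startswith code "K74" || PySem.Str.startswith code "B18" ||
        PySem.Str.startswith code "B19" then PySem.Set.add flags "liver_disease" else flags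
     let flags := if PySem.Str.startswith code "Z87.891" then PySem.Set.add flags "tobacco" else flags
     flags) = PySem.Set.update s (pvHitsOf dx) := by
  simp only [pvHitsOf]
  generalize PySem.Str.upper (PySem.Dict.getD (PySem.Dict.mk dx) "icd10_code" "") = code
  simp only [pvRiskPrefixes, List.filter, List.any, Bool.or_false, Bool.or_assoc]
  cases h1 : (PySem.Str.startswith code "J44" || PySem.Str.startswith code "J45") <;>
  cases h2 : (PySem.Str.startswith code "I50" || (PySem.Str.startswith code "I25" ||
      PySem.Str.startswith code "I48")) <;>
  cases h3 : (PySem.Str.startswith code "E10" || PySem.Str.startswith code "E11") <;>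
  cases h4 : (PySem.Str.startswith code "K70" || (PySem.Str.startswith code "K71" ||
      (PySem.Str.startswith code "K72" || (PySem.Str.startswith code "K73" ||
      (PySem.Str.startswith code "K74" || (PySem.Str.startswith code "B18" ||
      PySem.Str.startswith code "B19")))))) <;>
  cases h5 : PySem.Str.startswith code "Z87.891" <;>
  simp [PySem.Set.update, List.foldl]

-- A's whole loop accumulates the concatenation of the per-diagnosis hit lists.
lemma a_foldl_eq (l : List (List (String × String))) : ∀ (s : List String),
    l.foldl (fun flags dx =>
      let code := PySem.Str.upper (PySem.Dict.getD (PySem.Dict.mk dx) "icd10_code" "")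
      let flags := if PySem.Str.startswith code "J44" || PySem.Str.startswith code "J45" then
          PySem.Set.add flags "chronic_lung" else flags
      let flags := if PySem.Str.startswith code "I50" || PySem.Str.startswith code "I25" ||
          PySem.Str.startswith code "I48" then PySem.Set.add flags "chronic_heart" else flags
      let flags := if PySem.Str.startswith code "E10" || PySem.Str.startswith code "E11" then
          PySem.Set.add flags "diabetes" else flags
      let flags := if PySem.Str.startswith code "K70" || PySem.Str.startswith code "K71" ||
          PySem.Str.startswith code "K72" || PySem.Str.startswith code "K73" ||
          PySem.Str.startswith code "K74" || PySem.Str.startswith code "B18" ||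
          PySem.Str.startswith code "B19" then PySem.Set.add flags "liver_disease" else flags
      let flags := if PySem.Str.startswith code "Z87.891" then PySem.Set.add flags "tobacco" else flags
      flags) s = PySem.Set.update s (l.flatMap pvHitsOf) := by
  induction l with
  | nil => intro s; simp [PySem.Set.update]
  | cons dx rest ih =>
      intro s
      rw [List.foldl_cons, extract_step_eq s dx, List.flatMap_cons, PySem.Set.update_append, ih]

-- updating with a set's elements is updating with the underlying list
lemma upd_ofList (b : List String) : ∀ (s : PySem.Set String),
    PySem.Set.update s (PySem.Set.ofList b) = PySem.Set.update s b := by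
  induction b using List.reverseRecOn with
  | nil => intro s; simp [PySem.Set.ofList]
  | append_singleton xs x ih =>
    intro s
    rw [PySem.Set.ofList_append_singleton, PySem.Set.update_append, ← ih]
    by_cases h : x ∈ PySem.Set.ofList xs
    · rw [PySem.Set.add_of_mem h]
      have : x ∈ PySem.Set.update s (PySem.Set.ofList xs) := by
        rw [PySem.Set.mem_update]; right; exact h
      exact (PySem.Set.add_of_mem this).symm
    · rw [PySem.Set.add_of_not_mem h, PySem.Set.update_append]

-- B computes set(concatenated hit lists)
lemma alt_eq (l : List (List (String × String))) :
    extract_risk_flags_py_alt l = PySem.Set.ofList (l.flatMap pvHitsOf) := by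
  fun_induction extract_risk_flags_py_alt l with
  | case1 => rfl
  | case2 dx => simp only [List.flatMap_cons, List.flatMap_nil, List.append_nil]; rfl
  | case3 dx1 dx2 rest ih1 ih2 =>
      rw [ih1, ih2]
      show PySem.Set.update _ _ = _
      rw [upd_ofList, ← PySem.Set.ofList_append, ← List.flatMap_append,
          List.take_append_drop]

-- ===== VERDICT (by name: the statement is the Claim_ definition above) =====
theorem extract_risk_flags_py_spec : Claim_equal_extract_risk_flags_py := by
  intro diagnoses _
  unfold Spec_extract_risk_flags_py extract_risk_flags_py
  rw [a_foldl_eq, alt_eq]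
  rfl
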